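-- pv_equiv track=rewrite | github.com/binlecode/co-cli | co_cli/tools/articles.py | _has_negation_conflict
-- ===== SOURCE A (Python) =====
-- _NEGATION_MARKERS: frozenset[str] = frozenset({
--     "not", "no", "never", "don't", "do not", "stopped", "changed",
--     "no longer", "don't use", "avoid",
-- })
--
-- def _has_negation_conflict(content_a: str, content_b: str) -> bool:
--     """Check if content_a and content_b form an opposing pair.
--
--     Tokenizes both contents. For each token in content_a that also appears in
--     content_b, checks if a negation marker appears within a 5-token window
--     around that token in either content.
--     """
--     tokens_a = content_a.split()
--     tokens_b = content_b.split()
--     shared_words = set(tokens_a) & set(tokens_b) - _NEGATION_MARKERS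
--
--     if not shared_words:
--         return False
--
--     # Check if a negation marker appears near a shared word in either content
--     for tokens, other_tokens in [(tokens_a, tokens_b), (tokens_b, tokens_a)]:
--         for idx, token in enumerate(tokens):
--             if token in shared_words:
--                 window_start = max(0, idx - 5)
--                 window_end = min(len(tokens), idx + 6)
--                 window = set(tokens[window_start:window_end])
--                 if window & _NEGATION_MARKERS:
--                     # Also confirm the other content has the shared word without negation
--                     # or with negation (either direction counts as conflict)
--                     if token in other_tokens:
--                         return True
--
--     return False
-- ===== SOURCE B (Python) =====
-- _NEGATION_MARKERS: frozenset[str] = frozenset({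
--     "not", "no", "never", "don't", "do not", "stopped", "changed",
--     "no longer", "don't use", "avoid",
-- })
--
--
-- def _near(tokens, shared):
--     """One linear pass with two registers: remember the index of the most
--     recent shared word and of the most recent negation marker; a conflict
--     exists exactly when the two come within 5 positions of each other."""
--     last_shared = None
--     last_marker = None
--     for i, tok in enumerate(tokens):
--         if tok in shared:
--             if last_marker is not None and i - last_marker <= 5:
--                 return True
--             last_shared = i
--         elif tok in _NEGATION_MARKERS:
--             if last_shared is not None and i - last_shared <= 5:
--                 return True
--             last_marker = i
--     return False
--
--
-- def _has_negation_conflict(content_a: str, content_b: str) -> bool: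
--     tokens_a = content_a.split()
--     tokens_b = content_b.split()
--     shared = (set(tokens_a) & set(tokens_b)) - _NEGATION_MARKERS
--     if not shared:
--         return False
--     return _near(tokens_a, shared) or _near(tokens_b, shared)
-- ===== Notes on version B (the rewrite author's own statement) =====
-- stated objective: alternative
-- what changed: B replaces A's per-occurrence window slicing and set intersection with a single linear pass per content carrying two registers (index of the most recent shared word and of the most recent negation marker), reporting a conflict as soon as the two registers come within 5 positions; the dead 'token in other_tokens' re-check disappears.
import Mathlib
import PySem

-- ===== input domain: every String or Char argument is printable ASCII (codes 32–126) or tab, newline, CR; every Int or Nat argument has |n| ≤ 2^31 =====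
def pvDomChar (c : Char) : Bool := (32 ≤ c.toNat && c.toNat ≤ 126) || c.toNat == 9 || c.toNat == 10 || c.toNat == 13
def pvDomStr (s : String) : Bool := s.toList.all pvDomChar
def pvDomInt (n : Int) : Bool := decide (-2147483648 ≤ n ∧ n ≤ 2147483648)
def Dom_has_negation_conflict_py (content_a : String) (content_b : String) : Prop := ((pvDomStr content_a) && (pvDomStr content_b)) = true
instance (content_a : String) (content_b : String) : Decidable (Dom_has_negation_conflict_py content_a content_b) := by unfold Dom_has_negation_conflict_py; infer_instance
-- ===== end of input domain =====

-- B replaces A's per-occurrence window slicing/intersection with one linear pass per content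
-- carrying two registers (last shared-word index, last marker index); same results, alternative algorithm.


-- ===== PORT A =====
def pvMarkers : PySem.Set String :=
  PySem.Set.ofList ["not", "no", "never", "don't", "do not", "stopped", "changed",
                    "no longer", "don't use", "avoid"]

-- one pass of A's outer loop: (tokens, other_tokens)
def pvSideA (tokens other_tokens : List String) (shared : PySem.Set String) : Bool :=
  (PySem.List.enumerate tokens 0).any (fun p =>
    let idx := p.1
    let token := p.2
    if PySem.Set.contains shared token then
      let window_start : Int := max 0 (idx - 5)
      let window_end : Int := min (tokens.length : Int) (idx + 6)
      let window : PySem.Set String :=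
        PySem.Set.ofList (PySem.List.slice tokens (some window_start) (some window_end))
      if (PySem.Set.inter window pvMarkers).isEmpty then false
      else other_tokens.contains token
    else false)

def has_negation_conflict_py (content_a : String) (content_b : String) : Bool :=
  let tokens_a := PySem.Str.split₀ content_a
  let tokens_b := PySem.Str.split₀ content_b
  let shared_words := PySem.Set.diff
      (PySem.Set.inter (PySem.Set.ofList tokens_a) (PySem.Set.ofList tokens_b)) pvMarkers
  if shared_words.isEmpty then false
  else pvSideA tokens_a tokens_b shared_words || pvSideA tokens_b tokens_a shared_words

-- ===== PORT B =====
-- B's `_near`: a single pass over the tokens carrying the index of the most recent shared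
-- word and of the most recent negation marker; true as soon as the two are ≤ 5 apart.
def pvNear (shared : PySem.Set String) : List String → Nat → Option Nat → Option Nat → Bool
  | [], _, _, _ => false
  | tok :: rest, i, last_shared, last_marker =>
    if PySem.Set.contains shared tok then
      match last_marker with
      | some j => if i - j ≤ 5 then true else pvNear shared rest (i + 1) (some i) last_marker
      | none => pvNear shared rest (i + 1) (some i) last_marker
    else if PySem.Set.contains pvMarkers tok then
      match last_shared with
      | some j => if i - j ≤ 5 then true else pvNear shared rest (i + 1) last_shared (some i)
      | none => pvNear shared rest (i + 1) last_shared (some i)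
    else pvNear shared rest (i + 1) last_shared last_marker

def has_negation_conflict_py_alt (content_a : String) (content_b : String) : Bool :=
  let tokens_a := PySem.Str.split₀ content_a
  let tokens_b := PySem.Str.split₀ content_b
  let shared := PySem.Set.diff
      (PySem.Set.inter (PySem.Set.ofList tokens_a) (PySem.Set.ofList tokens_b)) pvMarkers
  if shared.isEmpty then false
  else pvNear shared tokens_a 0 none none || pvNear shared tokens_b 0 none none

-- ===== PRECONDITION & SPEC =====
def Spec_has_negation_conflict_py (content_a : String) (content_b : String) (out : Bool) : Prop := out = has_negation_conflict_py_alt content_a content_b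
instance (content_a : String) (content_b : String) (out : Bool) : Decidable (Spec_has_negation_conflict_py content_a content_b out) := by unfold Spec_has_negation_conflict_py; infer_instance

-- ===== CLAIM (what is proved, stated in full; the proofs are below) =====
def Claim_equal_has_negation_conflict_py : Prop := ∀ (content_a : String) (content_b : String), Dom_has_negation_conflict_py content_a content_b → Spec_has_negation_conflict_py content_a content_b (has_negation_conflict_py content_a content_b)

-- ===== LEMMAS AND PROOFS =====

-- membership in a drop/take slice, by index
theorem pv_mem_drop_take {α : Type} (xs : List α) (a m : Nat) (x : α) :
    x ∈ (xs.drop a).take m ↔ ∃ j : Nat, a ≤ j ∧ j < a + m ∧ xs[j]? = some x := by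
  rw [List.mem_iff_getElem?]
  constructor
  · rintro ⟨i, hi⟩
    rw [show ((xs.drop a).take m)[i]? = if i < m then xs[a+i]? else none by
      simp [List.getElem?_take, List.getElem?_drop]] at hi
    by_cases h : i < m
    · exact ⟨a + i, by omega, by omega, by simpa [h] using hi⟩
    · simp [h] at hi
  · rintro ⟨j, h1, h2, h3⟩
    refine ⟨j - a, ?_⟩
    rw [show ((xs.drop a).take m)[j-a]? = if j - a < m then xs[a+(j-a)]? else none by
      simp [List.getElem?_take, List.getElem?_drop]]
    rw [show a + (j - a) = j by omega]
    simp [show j - a < m by omega, h3]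

-- characterization of A's per-content pass
theorem pv_sideA_iff (tokens other : List String) (S : PySem.Set String) :
    pvSideA tokens other S = true ↔
      ∃ (i j : Nat) (_ : i < tokens.length) (_ : j < tokens.length),
        i ≤ j + 5 ∧ j ≤ i + 5 ∧ tokens[i] ∈ S ∧ tokens[j] ∈ pvMarkers ∧ tokens[i] ∈ other := by
  unfold pvSideA
  rw [List.any_eq_true]
  constructor
  · rintro ⟨p, hp, hbody⟩
    rw [PySem.List.mem_enumerate_iff] at hp
    rcases hp with ⟨k, hk, rfl⟩
    simp only [Int.zero_add] at hbody
    split at hbody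
    case isTrue hS =>
      split at hbody
      case isTrue => exact absurd hbody (by simp)
      case isFalse hE =>
        rw [Bool.not_eq_true, List.isEmpty_eq_false_iff, ← List.length_pos_iff,
            List.length_pos_iff_exists_mem] at hE
        rcases hE with ⟨t, ht⟩
        rw [PySem.Set.mem_inter] at ht
        rcases ht with ⟨htw, htm⟩
        rw [PySem.Set.mem_ofList] at htw
        rw [show (max 0 ((k : Int) - 5)) = ((k - 5 : Nat) : Int) by omega,
            show (min (tokens.length : Int) ((k : Int) + 6)) = ((min tokens.length (k + 6) : Nat) : Int) by omega,
            PySem.List.slice_natCast, pv_mem_drop_take] at htw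
        rcases htw with ⟨j, hj1, hj2, hj3⟩
        have hjl : j < tokens.length := by
          by_contra h
          simp [List.getElem?_eq_none (by omega : tokens.length ≤ j)] at hj3
        have hjt : tokens[j] = t := by simpa [List.getElem?_eq_getElem hjl] using hj3
        refine ⟨k, j, hk, hjl, by omega, by omega, ?_, by rw [hjt]; exact htm, ?_⟩
        · exact (PySem.Set.contains_iff _ _).mp hS
        · simpa [List.contains_iff_mem] using hbody
    case isFalse => exact absurd hbody (by simp)
  · rintro ⟨i, j, hi, hj, hij1, hij2, hiS, hjM, hio⟩
    refine ⟨((i : Int), tokens[i]), ?_, ?_⟩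
    · rw [PySem.List.mem_enumerate_iff]; exact ⟨i, hi, by simp⟩
    · rw [if_pos ((PySem.Set.contains_iff _ _).mpr hiS)]
      have hne : ¬ ((PySem.Set.inter (PySem.Set.ofList (PySem.List.slice tokens
          (some (max 0 ((i : Int) - 5))) (some (min (tokens.length : Int) ((i : Int) + 6))))) pvMarkers).isEmpty = true) := by
        rw [Bool.not_eq_true, List.isEmpty_eq_false_iff, ← List.length_pos_iff,
            List.length_pos_iff_exists_mem]
        refine ⟨tokens[j], ?_⟩
        rw [PySem.Set.mem_inter, PySem.Set.mem_ofList,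
            show (max 0 ((i : Int) - 5)) = ((i - 5 : Nat) : Int) by omega,
            show (min (tokens.length : Int) ((i : Int) + 6)) = ((min tokens.length (i + 6) : Nat) : Int) by omega,
            PySem.List.slice_natCast, pv_mem_drop_take]
        exact ⟨⟨j, by omega, by omega, by simp [List.getElem?_eq_getElem hj]⟩, hjM⟩
      rw [if_neg hne]
      simpa [List.contains_iff_mem] using hio

-- what pvNear's registers mean mid-pass: some token in the remaining suffix completes a
-- ≤5-apart (shared word, marker) pair, either with a register or with an earlier suffix token
def pvNearSpec (S : PySem.Set String) (ts : List String) (i : Nat) (ls lm : Option Nat) : Prop :=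
  ∃ k t, ts[k]? = some t ∧
    ((t ∈ S ∧ ((∃ j, lm = some j ∧ i + k ≤ j + 5) ∨
        (∃ m u, m < k ∧ ts[m]? = some u ∧ ¬ u ∈ S ∧ u ∈ pvMarkers ∧ k ≤ m + 5))) ∨
     (¬ t ∈ S ∧ t ∈ pvMarkers ∧ ((∃ j, ls = some j ∧ i + k ≤ j + 5) ∨
        (∃ m u, m < k ∧ ts[m]? = some u ∧ u ∈ S ∧ k ≤ m + 5))))

theorem pv_specS_step (S : PySem.Set String) (tok : String) (rest : List String)
    (i : Nat) (ls lm : Option Nat) (hS : tok ∈ S)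
    (hls : ∀ j, ls = some j → j < i)
    (hmiss : ∀ j, lm = some j → ¬ i ≤ j + 5) :
    pvNearSpec S (tok :: rest) i ls lm ↔ pvNearSpec S rest (i + 1) (some i) lm := by
  unfold pvNearSpec
  constructor
  · rintro ⟨k, t, hkt, hcase⟩
    match k, hkt with
    | 0, hkt =>
      obtain rfl : tok = t := by simpa using hkt
      rcases hcase with ⟨_, hj | ⟨m, u, hm, _⟩⟩ | ⟨htS, _⟩
      · rcases hj with ⟨j, hj, harith⟩; exact absurd (by omega) (hmiss j hj)
      · omega
      · exact absurd hS htS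
    | (k' + 1), hkt =>
      simp only [List.getElem?_cons_succ] at hkt
      rcases hcase with ⟨htS, hj | ⟨m, u, hm, hmu, huS, huM, harith⟩⟩ | ⟨htS, htM, hj | ⟨m, u, hm, hmu, huS, harith⟩⟩
      · rcases hj with ⟨j, hj, harith⟩
        exact ⟨k', t, hkt, Or.inl ⟨htS, Or.inl ⟨j, hj, by omega⟩⟩⟩
      · match m, hmu with
        | 0, hmu =>
          obtain rfl : tok = u := by simpa using hmu
          exact absurd hS huS
        | (m' + 1), hmu =>
          simp only [List.getElem?_cons_succ] at hmu
          exact ⟨k', t, hkt, Or.inl ⟨htS, Or.inr ⟨m', u, by omega, hmu, huS, huM, by omega⟩⟩⟩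
      · rcases hj with ⟨j, hj, harith⟩
        have := hls j hj
        exact ⟨k', t, hkt, Or.inr ⟨htS, htM, Or.inl ⟨i, rfl, by omega⟩⟩⟩
      · match m, hmu with
        | 0, hmu =>
          obtain rfl : tok = u := by simpa using hmu
          exact ⟨k', t, hkt, Or.inr ⟨htS, htM, Or.inl ⟨i, rfl, by omega⟩⟩⟩
        | (m' + 1), hmu =>
          simp only [List.getElem?_cons_succ] at hmu
          exact ⟨k', t, hkt, Or.inr ⟨htS, htM, Or.inr ⟨m', u, by omega, hmu, huS, by omega⟩⟩⟩
  · rintro ⟨k', t, hkt, hcase⟩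
    refine ⟨k' + 1, t, by simpa using hkt, ?_⟩
    rcases hcase with ⟨htS, hj | ⟨m', u, hm, hmu, huS, huM, harith⟩⟩ | ⟨htS, htM, hj | ⟨m', u, hm, hmu, huS, harith⟩⟩
    · rcases hj with ⟨j, hj, harith⟩
      exact Or.inl ⟨htS, Or.inl ⟨j, hj, by omega⟩⟩
    · exact Or.inl ⟨htS, Or.inr ⟨m' + 1, u, by omega, by simpa using hmu, huS, huM, by omega⟩⟩
    · rcases hj with ⟨j, hj, harith⟩
      obtain rfl : i = j := by simpa using hj
      exact Or.inr ⟨htS, htM, Or.inr ⟨0, tok, by omega, by simp, hS, by omega⟩⟩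
    · exact Or.inr ⟨htS, htM, Or.inr ⟨m' + 1, u, by omega, by simpa using hmu, huS, by omega⟩⟩

theorem pv_specM_step (S : PySem.Set String) (tok : String) (rest : List String)
    (i : Nat) (ls lm : Option Nat) (hSn : ¬ tok ∈ S) (hM : tok ∈ pvMarkers)
    (hlm : ∀ j, lm = some j → j < i)
    (hmiss : ∀ j, ls = some j → ¬ i ≤ j + 5) :
    pvNearSpec S (tok :: rest) i ls lm ↔ pvNearSpec S rest (i + 1) ls (some i) := by
  unfold pvNearSpec
  constructor
  · rintro ⟨k, t, hkt, hcase⟩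
    match k, hkt with
    | 0, hkt =>
      obtain rfl : tok = t := by simpa using hkt
      rcases hcase with ⟨htS, _⟩ | ⟨_, _, hj | ⟨m, u, hm, _⟩⟩
      · exact absurd htS hSn
      · rcases hj with ⟨j, hj, harith⟩; exact absurd (by omega) (hmiss j hj)
      · omega
    | (k' + 1), hkt =>
      simp only [List.getElem?_cons_succ] at hkt
      rcases hcase with ⟨htS, hj | ⟨m, u, hm, hmu, huS, huM, harith⟩⟩ | ⟨htS, htM, hj | ⟨m, u, hm, hmu, huS, harith⟩⟩
      · rcases hj with ⟨j, hj, harith⟩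
        have := hlm j hj
        exact ⟨k', t, hkt, Or.inl ⟨htS, Or.inl ⟨i, rfl, by omega⟩⟩⟩
      · match m, hmu with
        | 0, hmu =>
          obtain rfl : tok = u := by simpa using hmu
          exact ⟨k', t, hkt, Or.inl ⟨htS, Or.inl ⟨i, rfl, by omega⟩⟩⟩
        | (m' + 1), hmu =>
          simp only [List.getElem?_cons_succ] at hmu
          exact ⟨k', t, hkt, Or.inl ⟨htS, Or.inr ⟨m', u, by omega, hmu, huS, huM, by omega⟩⟩⟩
      · rcases hj with ⟨j, hj, harith⟩
        exact ⟨k', t, hkt, Or.inr ⟨htS, htM, Or.inl ⟨j, hj, by omega⟩⟩⟩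
      · match m, hmu with
        | 0, hmu =>
          obtain rfl : tok = u := by simpa using hmu
          exact absurd huS hSn
        | (m' + 1), hmu =>
          simp only [List.getElem?_cons_succ] at hmu
          exact ⟨k', t, hkt, Or.inr ⟨htS, htM, Or.inr ⟨m', u, by omega, hmu, huS, by omega⟩⟩⟩
  · rintro ⟨k', t, hkt, hcase⟩
    refine ⟨k' + 1, t, by simpa using hkt, ?_⟩
    rcases hcase with ⟨htS, hj | ⟨m', u, hm, hmu, huS, huM, harith⟩⟩ | ⟨htS, htM, hj | ⟨m', u, hm, hmu, huS, harith⟩⟩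
    · rcases hj with ⟨j, hj, harith⟩
      obtain rfl : i = j := by simpa using hj
      exact Or.inl ⟨htS, Or.inr ⟨0, tok, by omega, by simp, hSn, hM, by omega⟩⟩
    · exact Or.inl ⟨htS, Or.inr ⟨m' + 1, u, by omega, by simpa using hmu, huS, huM, by omega⟩⟩
    · rcases hj with ⟨j, hj, harith⟩
      exact Or.inr ⟨htS, htM, Or.inl ⟨j, hj, by omega⟩⟩
    · exact Or.inr ⟨htS, htM, Or.inr ⟨m' + 1, u, by omega, by simpa using hmu, huS, by omega⟩⟩

theorem pv_specN_step (S : PySem.Set String) (tok : String) (rest : List String)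
    (i : Nat) (ls lm : Option Nat) (hSn : ¬ tok ∈ S) (hMn : ¬ tok ∈ pvMarkers) :
    pvNearSpec S (tok :: rest) i ls lm ↔ pvNearSpec S rest (i + 1) ls lm := by
  unfold pvNearSpec
  constructor
  · rintro ⟨k, t, hkt, hcase⟩
    match k, hkt with
    | 0, hkt =>
      obtain rfl : tok = t := by simpa using hkt
      rcases hcase with ⟨htS, _⟩ | ⟨_, htM, _⟩
      · exact absurd htS hSn
      · exact absurd htM hMn
    | (k' + 1), hkt =>
      simp only [List.getElem?_cons_succ] at hkt
      rcases hcase with ⟨htS, hj | ⟨m, u, hm, hmu, huS, huM, harith⟩⟩ | ⟨htS, htM, hj | ⟨m, u, hm, hmu, huS, harith⟩⟩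
      · rcases hj with ⟨j, hj, harith⟩
        exact ⟨k', t, hkt, Or.inl ⟨htS, Or.inl ⟨j, hj, by omega⟩⟩⟩
      · match m, hmu with
        | 0, hmu =>
          obtain rfl : tok = u := by simpa using hmu
          exact absurd huM hMn
        | (m' + 1), hmu =>
          simp only [List.getElem?_cons_succ] at hmu
          exact ⟨k', t, hkt, Or.inl ⟨htS, Or.inr ⟨m', u, by omega, hmu, huS, huM, by omega⟩⟩⟩
      · rcases hj with ⟨j, hj, harith⟩
        exact ⟨k', t, hkt, Or.inr ⟨htS, htM, Or.inl ⟨j, hj, by omega⟩⟩⟩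
      · match m, hmu with
        | 0, hmu =>
          obtain rfl : tok = u := by simpa using hmu
          exact absurd huS hSn
        | (m' + 1), hmu =>
          simp only [List.getElem?_cons_succ] at hmu
          exact ⟨k', t, hkt, Or.inr ⟨htS, htM, Or.inr ⟨m', u, by omega, hmu, huS, by omega⟩⟩⟩
  · rintro ⟨k', t, hkt, hcase⟩
    refine ⟨k' + 1, t, by simpa using hkt, ?_⟩
    rcases hcase with ⟨htS, hj | ⟨m', u, hm, hmu, huS, huM, harith⟩⟩ | ⟨htS, htM, hj | ⟨m', u, hm, hmu, huS, harith⟩⟩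
    · rcases hj with ⟨j, hj, harith⟩
      exact Or.inl ⟨htS, Or.inl ⟨j, hj, by omega⟩⟩
    · exact Or.inl ⟨htS, Or.inr ⟨m' + 1, u, by omega, by simpa using hmu, huS, huM, by omega⟩⟩
    · rcases hj with ⟨j, hj, harith⟩
      exact Or.inr ⟨htS, htM, Or.inl ⟨j, hj, by omega⟩⟩
    · exact Or.inr ⟨htS, htM, Or.inr ⟨m' + 1, u, by omega, by simpa using hmu, huS, by omega⟩⟩

theorem pv_near_iff (S : PySem.Set String) :
    ∀ (ts : List String) (i : Nat) (ls lm : Option Nat),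
      (∀ j, ls = some j → j < i) → (∀ j, lm = some j → j < i) →
      (pvNear S ts i ls lm = true ↔ pvNearSpec S ts i ls lm)
  | [], i, ls, lm, _, _ => by
    simp [pvNear, pvNearSpec]
  | tok :: rest, i, ls, lm, hls, hlm => by
    by_cases hS : PySem.Set.contains S tok
    · have hSm : tok ∈ S := (PySem.Set.contains_iff _ _).mp hS
      cases lm with
      | some j =>
        have hji : j < i := hlm j rfl
        have hstep : pvNear S (tok :: rest) i ls (some j) =
            (if i - j ≤ 5 then true else pvNear S rest (i + 1) (some i) (some j)) := by
          show (if PySem.Set.contains S tok then _ else _) = _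
          rw [if_pos hS]
        by_cases hhit : i - j ≤ 5
        · rw [hstep, if_pos hhit]
          simp only [true_iff]
          exact ⟨0, tok, by simp, Or.inl ⟨hSm, Or.inl ⟨j, rfl, by omega⟩⟩⟩
        · rw [hstep, if_neg hhit]
          rw [pv_near_iff S rest (i + 1) (some i) (some j)
              (fun x hx => by obtain rfl : i = x := (by simpa using hx); omega)
              (fun x hx => by obtain rfl : j = x := (by simpa using hx); omega)]
          exact (pv_specS_step S tok rest i ls (some j) hSm hls
            (fun x hx => by obtain rfl : j = x := (by simpa using hx); omega)).symm
      | none =>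
        have hstep : pvNear S (tok :: rest) i ls none =
            pvNear S rest (i + 1) (some i) none := by
          show (if PySem.Set.contains S tok then _ else _) = _
          rw [if_pos hS]
        rw [hstep]
        rw [pv_near_iff S rest (i + 1) (some i) none
            (fun x hx => by obtain rfl : i = x := (by simpa using hx); omega)
            (fun x hx => by cases hx)]
        exact (pv_specS_step S tok rest i ls none hSm hls (fun x hx => by cases hx)).symm
    · have hSn : ¬ tok ∈ S := fun h => hS ((PySem.Set.contains_iff _ _).mpr h)
      by_cases hM : PySem.Set.contains pvMarkers tok
      · have hMm : tok ∈ pvMarkers := (PySem.Set.contains_iff _ _).mp hM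
        cases ls with
        | some j =>
          have hji : j < i := hls j rfl
          have hstep : pvNear S (tok :: rest) i (some j) lm =
              (if i - j ≤ 5 then true else pvNear S rest (i + 1) (some j) (some i)) := by
            show (if PySem.Set.contains S tok then _
                  else if PySem.Set.contains pvMarkers tok then _ else _) = _
            rw [if_neg hS, if_pos hM]
          by_cases hhit : i - j ≤ 5
          · rw [hstep, if_pos hhit]
            simp only [true_iff]
            exact ⟨0, tok, by simp, Or.inr ⟨hSn, hMm, Or.inl ⟨j, rfl, by omega⟩⟩⟩
          · rw [hstep, if_neg hhit]
            rw [pv_near_iff S rest (i + 1) (some j) (some i)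
                (fun x hx => by obtain rfl : j = x := (by simpa using hx); omega)
                (fun x hx => by obtain rfl : i = x := (by simpa using hx); omega)]
            exact (pv_specM_step S tok rest i (some j) lm hSn hMm hlm
              (fun x hx => by obtain rfl : j = x := (by simpa using hx); omega)).symm
        | none =>
          have hstep : pvNear S (tok :: rest) i none lm =
              pvNear S rest (i + 1) none (some i) := by
            show (if PySem.Set.contains S tok then _
                  else if PySem.Set.contains pvMarkers tok then _ else _) = _
            rw [if_neg hS, if_pos hM]
          rw [hstep]
          rw [pv_near_iff S rest (i + 1) none (some i)
              (fun x hx => by cases hx)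
              (fun x hx => by obtain rfl : i = x := (by simpa using hx); omega)]
          exact (pv_specM_step S tok rest i none lm hSn hMm hlm (fun x hx => by cases hx)).symm
      · have hMn : ¬ tok ∈ pvMarkers := fun h => hM ((PySem.Set.contains_iff _ _).mpr h)
        have hstep : pvNear S (tok :: rest) i ls lm = pvNear S rest (i + 1) ls lm := by
          show (if PySem.Set.contains S tok then _
                else if PySem.Set.contains pvMarkers tok then _ else _) = _
          rw [if_neg hS, if_neg hM]
        rw [hstep]
        rw [pv_near_iff S rest (i + 1) ls lm
            (fun x hx => by have := hls x hx; omega)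
            (fun x hx => by have := hlm x hx; omega)]
        exact (pv_specN_step S tok rest i ls lm hSn hMn).symm

-- B's pass from the initial state finds exactly the ≤5-apart (shared word, marker) pairs
theorem pv_near_top (S : PySem.Set String) (hdisj : ∀ t ∈ S, ¬ t ∈ pvMarkers)
    (ts : List String) :
    pvNear S ts 0 none none = true ↔
      ∃ (p q : Nat) (_ : p < ts.length) (_ : q < ts.length),
        p ≤ q + 5 ∧ q ≤ p + 5 ∧ ts[p] ∈ S ∧ ts[q] ∈ pvMarkers := by
  rw [pv_near_iff S ts 0 none none (by rintro x hx; cases hx) (by rintro x hx; cases hx)]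
  unfold pvNearSpec
  constructor
  · rintro ⟨k, t, hkt, hcase⟩
    rw [List.getElem?_eq_some_iff] at hkt
    rcases hkt with ⟨hk, rfl⟩
    rcases hcase with ⟨htS, ⟨j, hj, _⟩ | ⟨m, u, hm, hmu, _, huM, harith⟩⟩ |
        ⟨_, htM, ⟨j, hj, _⟩ | ⟨m, u, hm, hmu, huS, harith⟩⟩
    · cases hj
    · rw [List.getElem?_eq_some_iff] at hmu
      rcases hmu with ⟨hml, rfl⟩
      exact ⟨k, m, hk, hml, by omega, by omega, htS, huM⟩
    · cases hj
    · rw [List.getElem?_eq_some_iff] at hmu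
      rcases hmu with ⟨hml, rfl⟩
      exact ⟨m, k, hml, hk, by omega, by omega, huS, htM⟩
  · rintro ⟨p, q, hp, hq, h1, h2, hpS, hqM⟩
    rcases Nat.lt_trichotomy p q with hlt | rfl | hgt
    · exact ⟨q, ts[q], by simp [List.getElem?_eq_getElem hq],
        Or.inr ⟨fun h => hdisj _ h hqM, hqM,
          Or.inr ⟨p, ts[p], hlt, by simp [List.getElem?_eq_getElem hp], hpS, by omega⟩⟩⟩
    · exact absurd hqM (hdisj _ hpS)
    · exact ⟨p, ts[p], by simp [List.getElem?_eq_getElem hp],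
        Or.inl ⟨hpS, Or.inr ⟨q, ts[q], hgt, by simp [List.getElem?_eq_getElem hq],
          fun h => hdisj _ h hqM, hqM, by omega⟩⟩⟩

-- given S ⊆ other and S disjoint from the markers, A's pass equals B's pass
theorem pv_side_eq_near (tokens other : List String) (S : PySem.Set String)
    (hS : ∀ t ∈ S, t ∈ other) (hdisj : ∀ t ∈ S, ¬ t ∈ pvMarkers) :
    pvSideA tokens other S = pvNear S tokens 0 none none := by
  rcases Bool.eq_false_or_eq_true (pvNear S tokens 0 none none) with hB | hB <;> rw [hB]
  · rw [pv_near_top S hdisj] at hB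
    rcases hB with ⟨p, q, hp, hq, h1, h2, hpS, hqM⟩
    rw [pv_sideA_iff]
    exact ⟨p, q, hp, hq, h1, h2, hpS, hqM, hS _ hpS⟩
  · rw [Bool.eq_false_iff, Ne, pv_near_top S hdisj] at hB
    rw [Bool.eq_false_iff, Ne, pv_sideA_iff]
    rintro ⟨i, j, hi, hj, h1, h2, hiS, hjM, _⟩
    exact hB ⟨i, j, hi, hj, h1, h2, hiS, hjM⟩

-- ===== VERDICT (by name: the statement is the Claim_ definition above) =====
theorem has_negation_conflict_py_spec : Claim_equal_has_negation_conflict_py := by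
  intro content_a content_b _
  unfold Spec_has_negation_conflict_py has_negation_conflict_py has_negation_conflict_py_alt
  simp only []
  set ta := PySem.Str.split₀ content_a with hta
  set tb := PySem.Str.split₀ content_b with htb
  set S := PySem.Set.diff (PySem.Set.inter (PySem.Set.ofList ta) (PySem.Set.ofList tb)) pvMarkers with hSdef
  have hSa : ∀ t ∈ S, t ∈ ta := by
    intro t ht
    simp only [hSdef, PySem.Set.mem_diff, PySem.Set.mem_inter, PySem.Set.mem_ofList] at ht
    exact ht.1.1
  have hSb : ∀ t ∈ S, t ∈ tb := by
    intro t ht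
    simp only [hSdef, PySem.Set.mem_diff, PySem.Set.mem_inter, PySem.Set.mem_ofList] at ht
    exact ht.1.2
  have hdisj : ∀ t ∈ S, ¬ t ∈ pvMarkers := by
    intro t ht
    simp only [hSdef, PySem.Set.mem_diff] at ht
    exact ht.2
  by_cases hE : S.isEmpty
  · simp [hE]
  · simp only [hE]
    rw [pv_side_eq_near ta tb S hSb hdisj, pv_side_eq_near tb ta S hSa hdisj]
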